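-- pv_equiv track=rewrite | github.com/shk3/edx-downloader | edx-dl.py | directory_name
-- ===== SOURCE A (Python) =====
-- def directory_name(initial_name):
--     """ cleans the string from non-allowed characters """
--     import string
--     allowed_chars = string.digits+string.ascii_letters+" _."
--     result_name = ""
--     for ch in initial_name:
--         if allowed_chars.find(ch) != -1:
--             result_name += ch
--     return result_name if result_name != "" else "course_folder"
-- ===== SOURCE B (Python) =====
-- import re
--
-- _DISALLOWED = re.compile(r'[^0-9A-Za-z _.]')
--
-- def directory_name(initial_name):
--     """cleans the string from non-allowed characters (regex single pass)"""
--     cleaned = _DISALLOWED.sub('', initial_name)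
--     return cleaned or "course_folder"
-- ===== Notes on version B (the rewrite author's own statement) =====
-- stated objective: idiomatic
-- what changed: Replaces the explicit per-character Python loop with string-find membership and incremental concatenation by a single compiled regex character-class substitution (re.sub) that strips all disallowed characters in one pass.
import Mathlib
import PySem

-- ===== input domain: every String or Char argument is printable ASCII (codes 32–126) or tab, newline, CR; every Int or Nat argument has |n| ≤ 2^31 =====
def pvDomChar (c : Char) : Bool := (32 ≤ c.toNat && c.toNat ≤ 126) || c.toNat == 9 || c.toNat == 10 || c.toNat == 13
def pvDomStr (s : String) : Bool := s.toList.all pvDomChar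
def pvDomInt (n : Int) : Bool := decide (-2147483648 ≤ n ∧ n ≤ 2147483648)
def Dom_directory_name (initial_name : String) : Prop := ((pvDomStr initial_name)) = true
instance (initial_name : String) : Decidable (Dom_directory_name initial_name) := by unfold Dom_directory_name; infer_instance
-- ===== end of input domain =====

-- B replaces A's per-character loop with string-find by a single regex character-class substitution (idiomatic, same result).


-- ===== PORT A =====
-- string.digits + string.ascii_letters + " _."
def dnAllowedChars : String := "0123456789abcdefghijklmnopqrstuvwxyzABCDEFGHIJKLMNOPQRSTUVWXYZ _."

def directory_name (initial_name : String) : String :=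
  let result_name : List Char :=
    initial_name.toList.foldl
      (fun acc ch =>
        if PySem.Str.find dnAllowedChars (String.singleton ch) ≠ -1 then acc ++ [ch] else acc)
      []
  if String.mk result_name ≠ "" then String.mk result_name else "course_folder"

-- ===== PORT B =====
-- the regex character class [^0-9A-Za-z _.]: a char is removed iff it does not match [0-9A-Za-z _.]
def dnClassMatch (c : Char) : Bool :=
  ('0' ≤ c && c ≤ '9') || ('A' ≤ c && c ≤ 'Z') || ('a' ≤ c && c ≤ 'z') || c == ' ' || c == '_' || c == '.'

def directory_name_alt (initial_name : String) : String :=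
  let cleaned := String.mk (initial_name.toList.filter dnClassMatch)
  if cleaned = "" then "course_folder" else cleaned

-- ===== PRECONDITION & SPEC =====
def Spec_directory_name (initial_name : String) (out : String) : Prop := out = directory_name_alt initial_name
instance (initial_name : String) (out : String) : Decidable (Spec_directory_name initial_name out) := by unfold Spec_directory_name; infer_instance

-- ===== CLAIM (what is proved, stated in full; the proofs are below) =====
def Claim_equal_directory_name : Prop := ∀ (initial_name : String), Dom_directory_name initial_name → Spec_directory_name initial_name (directory_name initial_name)

-- ===== LEMMAS AND PROOFS =====

-- per-character agreement of the two membership tests (finite check over all Char values ≤ 126)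
set_option maxRecDepth 8192 in
theorem dn_pred_agree (c : Char) (h : pvDomChar c = true) :
    (decide (PySem.Str.find dnAllowedChars (String.singleton c) ≠ -1)) = dnClassMatch c := by
  have hlt : c.toNat < 127 := by
    simp [pvDomChar] at h
    omega
  have hc : Char.ofNat c.toNat = c := Char.ofNat_toNat c
  have : ∀ n : Fin 127,
      (decide (PySem.Str.find dnAllowedChars (String.singleton (Char.ofNat n.1)) ≠ -1))
        = dnClassMatch (Char.ofNat n.1) := by decide
  have := this ⟨c.toNat, hlt⟩
  simpa [hc] using this

theorem directory_name_spec : Claim_equal_directory_name := by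
  intro s hdom
  unfold Spec_directory_name directory_name directory_name_alt
  have hfold :
      s.toList.foldl
        (fun acc ch =>
          if PySem.Str.find dnAllowedChars (String.singleton ch) ≠ -1 then acc ++ [ch] else acc)
        [] = s.toList.filter dnClassMatch := by
    rw [PySem.List.foldl_append_ite_eq_filter]
    simp only [List.nil_append]
    apply List.filter_congr
    intro c hc
    have hd : pvDomChar c = true := by
      have := hdom
      unfold Dom_directory_name pvDomStr at this
      exact List.all_eq_true.mp this c hc
    exact dn_pred_agree c hd
  rw [hfold]
  by_cases hE : String.mk (s.toList.filter dnClassMatch) = ""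
  · simp [hE]
  · simp [hE]

-- ===== VERDICT (by name: the statement is the Claim_ definition above) =====
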